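-- pv_equiv track=rewrite | github.com/ShahriyarShawon/dtms | dtms/prereq_parser.py | organize
-- ===== SOURCE A (Python) =====
-- def organize(choices: list[list[str]]):
--     if len(choices) == 1:
--         return [[item] for item in choices[0]]
--
--     first: list[str] = choices[0]
--     rest: list[list[str]] = organize(choices[1:])
--
--     out = []
--     for i in first:
--         for j in rest:
--             cp = [item for item in j]
--             cp.append(i)
--             out.append(cp)
--     return out
-- ===== SOURCE B (Python) =====
-- def organize(choices: list[list[str]]):
--     result = [[x] for x in choices[-1]]
--     for L in reversed(choices[:-1]):
--         result = [j + [i] for i in L for j in result]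
--     return result
-- ===== Notes on version B (the rewrite author's own statement) =====
-- stated objective: simpler
-- what changed: Replaced the recursion on choices[1:] with nested append loops by a single iterative fold: start from the last list and fold the remaining lists back-to-front with one comprehension.
import Mathlib
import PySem

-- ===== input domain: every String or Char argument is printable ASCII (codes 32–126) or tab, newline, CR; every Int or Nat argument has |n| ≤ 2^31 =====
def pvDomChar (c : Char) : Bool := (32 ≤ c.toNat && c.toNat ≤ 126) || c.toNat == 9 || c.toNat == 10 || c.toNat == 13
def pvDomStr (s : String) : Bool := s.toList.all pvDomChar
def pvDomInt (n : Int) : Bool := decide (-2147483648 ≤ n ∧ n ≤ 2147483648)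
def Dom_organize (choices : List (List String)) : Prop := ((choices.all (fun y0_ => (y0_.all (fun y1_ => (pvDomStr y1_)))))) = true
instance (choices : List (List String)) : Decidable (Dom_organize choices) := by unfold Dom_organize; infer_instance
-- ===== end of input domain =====

-- B replaces A's recursion by one iterative fold from the last list backwards (objective: simpler).

-- ===== PORT A =====
-- A: recursive; base case len == 1; otherwise nested loops appending j ++ [i] to out.
def organize : List (List String) → List (List String)
  | [] => []  -- Python A raises IndexError here; excluded by Pre_organize
  | [c] => c.map (fun item => [item])
  | c :: c2 :: cs =>
    let rest := organize (c2 :: cs)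
    c.foldl (fun out i => rest.foldl (fun out j => out ++ [j ++ [i]]) out) []

-- ===== PORT B =====
-- B: result = [[x] for x in choices[-1]]; then fold reversed(choices[:-1]) with one comprehension.
def organize_alt (choices : List (List String)) : List (List String) :=
  match choices.getLast? with
  | none => []  -- Python B raises IndexError here; excluded by Pre_organize
  | some last =>
    (choices.dropLast).reverse.foldl
      (fun result L => L.flatMap (fun i => result.map (fun j => j ++ [i])))
      (last.map (fun x => [x]))

-- ===== PRECONDITION & SPEC =====
-- Both Pythons raise IndexError on the empty list of choices.
def Pre_organize (choices : List (List String)) : Prop := choices ≠ []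
instance (choices : List (List String)) : Decidable (Pre_organize choices) := by unfold Pre_organize; infer_instance
def pvWitness_organize : List (List String) := [["a", "b"], ["c"]]

def Spec_organize (choices : List (List String)) (out : List (List String)) : Prop := out = organize_alt choices
instance (choices : List (List String)) (out : List (List String)) : Decidable (Spec_organize choices out) := by unfold Spec_organize; infer_instance

-- ===== CLAIM (what is proved, stated in full; the proofs are below) =====
def Claim_equal_organize : Prop := ∀ (choices : List (List String)), Dom_organize choices → Pre_organize choices → Spec_organize choices (organize choices)

-- ===== LEMMAS AND PROOFS =====

theorem foldl_push_eq_map (rest : List (List String)) (i : String) (acc : List (List String)) :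
    rest.foldl (fun out j => out ++ [j ++ [i]]) acc = acc ++ rest.map (fun j => j ++ [i]) := by
  induction rest generalizing acc with
  | nil => simp
  | cons h t ih => simp [List.foldl, ih]

theorem foldl_nested_eq_flatMap (first : List String) (rest : List (List String)) (acc : List (List String)) :
    first.foldl (fun out i => rest.foldl (fun out j => out ++ [j ++ [i]]) out) acc
      = acc ++ first.flatMap (fun i => rest.map (fun j => j ++ [i])) := by
  induction first generalizing acc with
  | nil => simp
  | cons h t ih =>
    rw [List.foldl_cons, foldl_push_eq_map, ih, List.flatMap_cons, List.append_assoc]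

theorem organize_alt_cons (c : List String) (c2 : List String) (cs : List (List String)) :
    organize_alt (c :: c2 :: cs)
      = c.flatMap (fun i => (organize_alt (c2 :: cs)).map (fun j => j ++ [i])) := by
  simp only [organize_alt]
  have hne : c2 :: cs ≠ [] := by simp
  simp only [List.getLast?_cons_cons, List.getLast?_eq_some_getLast hne,
      List.dropLast_cons_of_ne_nil hne, List.reverse_cons, List.foldl_append,
      List.foldl_cons, List.foldl_nil]

theorem organize_eq (choices : List (List String)) (h : choices ≠ []) :
    organize choices = organize_alt choices := by
  induction choices with
  | nil => exact absurd rfl h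
  | cons c cs ih =>
    cases cs with
    | nil => simp [organize, organize_alt]
    | cons c2 cs' =>
      rw [organize_alt_cons, ← ih (by simp)]
      simpa [organize] using foldl_nested_eq_flatMap c (organize (c2 :: cs')) []

-- ===== VERDICT (by name: the statement is the Claim_ definition above) =====
theorem organize_spec : Claim_equal_organize := by
  intro choices _ hpre
  exact organize_eq choices hpre
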